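-- pv_equiv track=rewrite | github.com/alexis-vu/Information-Retrieval | Search Engine/functions.py | parse
-- ===== SOURCE A (Python) =====
-- def parse(text):
--     tokens = []
--     length = len(text)
--     char = 0
--
--     while char < length:
--         if text[char] == '<':
--             while char < length and text[char] != '>':
--                 char += 1
--         else:
--             while char < length and text[char] == ' ':
--                char += 1
--
--             start = char
--
--             # 0-9,A-Z,a-z
--
--             while char < length and ( (ord(text[char]) > 47 and ord(text[char]) < 58) or (ord(text[char]) > 64 and ord(text[char]) < 91) or (ord(text[char]) > 96 and ord(text[char]) < 123) ):
--                 char += 1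
--
--             temp = text[start:char].lower()
--             if len(temp) > 0:
--                 tokens.append(temp)
--
--             if char < length and text[char] != '<':
--                 char += 1
--
--     return tokens
-- ===== SOURCE B (Python) =====
-- import re
--
-- def parse(text):
--     clean = re.sub(r'<[^>]*>?', ' ', text)
--     return [w.lower() for w in re.findall(r'[0-9A-Za-z]+', clean)]
-- ===== Notes on version B (the rewrite author's own statement) =====
-- stated objective: simpler
-- what changed: Replaced A's single-pass manual character state machine (index walking with three nested while loops and ord-range tests) by a two-pass regex pipeline: substitute each tag (from a left angle bracket through the next right angle bracket, or to end of string) with one space, then findall the ASCII alphanumeric runs and lowercase them.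
import Mathlib
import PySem

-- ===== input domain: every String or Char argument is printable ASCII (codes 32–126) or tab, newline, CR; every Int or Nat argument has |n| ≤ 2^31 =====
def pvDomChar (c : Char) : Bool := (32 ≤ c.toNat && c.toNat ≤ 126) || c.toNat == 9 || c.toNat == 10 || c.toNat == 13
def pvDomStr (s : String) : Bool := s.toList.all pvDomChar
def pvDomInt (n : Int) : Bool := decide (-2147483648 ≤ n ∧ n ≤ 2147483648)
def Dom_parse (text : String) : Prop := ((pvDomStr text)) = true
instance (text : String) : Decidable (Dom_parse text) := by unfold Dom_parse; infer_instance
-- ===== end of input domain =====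

-- B replaces A's single-pass index/state-machine tokenizer by a two-pass pipeline
-- (strip each tag to a space, then extract lowercased ASCII-alphanumeric runs): simpler, same O(n) cost.

-- ===== PORT A =====
-- A's ord-range test: 0-9, A-Z, a-z
def aIsAlnum (c : Char) : Bool :=
  decide ((47 < c.toNat ∧ c.toNat < 58) ∨ (64 < c.toNat ∧ c.toNat < 91) ∨ (96 < c.toNat ∧ c.toNat < 123))

-- inner `while char < length and text[char] != '>'`
def aSkipTag : List Char → List Char
  | [] => []
  | c :: rest => if c = '>' then c :: rest else aSkipTag rest

-- inner `while char < length and text[char] == ' '`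
def aSkipSpaces : List Char → List Char
  | [] => []
  | c :: rest => if c = ' ' then aSkipSpaces rest else c :: rest

-- the word-scanning while: returns (text[start:char], remainder)
def aTakeWord : List Char → List Char × List Char
  | [] => ([], [])
  | c :: rest =>
    if aIsAlnum c then
      let p := aTakeWord rest
      (c :: p.1, p.2)
    else ([], c :: rest)

theorem aSkipTag_length_le : ∀ cs : List Char, (aSkipTag cs).length ≤ cs.length := by
  intro cs; induction cs with
  | nil => simp [aSkipTag]
  | cons c rest ih => simp only [aSkipTag]; split <;> simp <;> omega

theorem aSkipSpaces_length_le : ∀ cs : List Char, (aSkipSpaces cs).length ≤ cs.length := by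
  intro cs; induction cs with
  | nil => simp [aSkipSpaces]
  | cons c rest ih => simp only [aSkipSpaces]; split <;> simp <;> omega

theorem aTakeWord_snd_length_le : ∀ cs : List Char, (aTakeWord cs).2.length ≤ cs.length := by
  intro cs; induction cs with
  | nil => simp [aTakeWord]
  | cons c rest ih => simp only [aTakeWord]; split <;> simp <;> omega

-- progress: in the else-branch (head ≠ '<'), if the remainder starts with '<' it is strictly shorter
theorem aProgress (c : Char) (rest ds : List Char) (hc : ¬ c = '<')
    (hp : (aTakeWord (aSkipSpaces (c :: rest))).2 = '<' :: ds) :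
    ds.length < rest.length := by
  by_cases hsp : c = ' '
  · subst hsp
    have h1 : aSkipSpaces (' ' :: rest) = aSkipSpaces rest := by simp [aSkipSpaces]
    rw [h1] at hp
    have := aTakeWord_snd_length_le (aSkipSpaces rest)
    have := aSkipSpaces_length_le rest
    rw [hp] at *; simp_all; omega
  · have h1 : aSkipSpaces (c :: rest) = c :: rest := by simp [aSkipSpaces, hsp]
    rw [h1] at hp
    by_cases ha : aIsAlnum c = true
    · simp only [aTakeWord, ha, if_pos] at hp
      have := aTakeWord_snd_length_le rest
      rw [hp] at this; simp at this; omega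
    · simp only [aTakeWord, ha] at hp
      simp at hp
      exact absurd hp.1 hc

-- the outer while loop, over the remaining characters (same state: remainder + tokens)
def aLoop : List Char → List String → List String
  | [], acc => acc
  | c :: rest, acc =>
    if hc : c = '<' then aLoop (aSkipTag rest) acc
    else
      let tok := (aTakeWord (aSkipSpaces (c :: rest))).1
      let acc' := if tok.length > 0 then acc ++ [String.mk (PySem.Chars.lower tok)] else acc
      match hp : (aTakeWord (aSkipSpaces (c :: rest))).2 with
      | [] => acc'
      | d :: ds =>
        if hd : d = '<' then aLoop (d :: ds) acc' else aLoop ds acc'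
termination_by cs _ => cs.length
decreasing_by
  · have := aSkipTag_length_le rest; simp; omega
  · subst hd; have := aProgress c rest ds hc hp
    simp only [List.length_cons]; omega
  · have h1 := aTakeWord_snd_length_le (aSkipSpaces (c :: rest))
    have h2 := aSkipSpaces_length_le (c :: rest)
    rw [hp] at h1
    simp only [List.length_cons] at h1 h2 ⊢; omega

def parse (text : String) : List String := aLoop text.toList []

-- ===== PORT B =====
-- regex class [0-9A-Za-z], ASCII only
def bIsAlnum (c : Char) : Bool :=
  decide (('0' ≤ c ∧ c ≤ '9') ∨ ('A' ≤ c ∧ c ≤ 'Z') ∨ ('a' ≤ c ∧ c ≤ 'z'))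

-- hand port of re.sub(r'<[^>]*>?', ' ', text): bDropTag consumes [^>]*>? after a '<'
def bDropTag : List Char → List Char
  | [] => []
  | c :: rest => if c = '>' then rest else bDropTag rest

theorem bDropTag_length_le : ∀ cs : List Char, (bDropTag cs).length ≤ cs.length := by
  intro cs; induction cs with
  | nil => simp [bDropTag]
  | cons c rest ih => simp only [bDropTag]; split <;> simp <;> omega

def bStrip : List Char → List Char
  | [] => []
  | c :: rest =>
    if hc : c = '<' then ' ' :: bStrip (bDropTag rest) else c :: bStrip rest
termination_by cs => cs.length
decreasing_by
  · have := bDropTag_length_le rest; simp; omega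
  · simp

-- hand port of re.findall(r'[0-9A-Za-z]+', clean): the maximal alphanumeric runs in order
def bWords : List Char → List (List Char)
  | [] => []
  | c :: rest =>
    if hc : bIsAlnum c then
      (c :: rest.takeWhile bIsAlnum) :: bWords (rest.dropWhile bIsAlnum)
    else bWords rest
termination_by cs => cs.length
decreasing_by
  · have := List.length_dropWhile_le bIsAlnum rest; simp; omega
  · simp

def parse_alt (text : String) : List String :=
  (bWords (bStrip text.toList)).map (fun w => String.mk (PySem.Chars.lower w))

-- ===== PRECONDITION & SPEC =====
def Spec_parse (text : String) (out : List String) : Prop := out = parse_alt text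
instance (text : String) (out : List String) : Decidable (Spec_parse text out) := by unfold Spec_parse; infer_instance

-- ===== CLAIM (what is proved, stated in full; the proofs are below) =====
def Claim_equal_parse : Prop := ∀ (text : String), Dom_parse text → Spec_parse text (parse text)

-- ===== LEMMAS AND PROOFS =====

theorem isAlnum_eq : bIsAlnum = aIsAlnum := by
  funext c
  simp only [aIsAlnum, bIsAlnum, decide_eq_decide, Char.le_def, UInt32.le_iff_toNat_le, Char.toNat]
  rw [show ('0').val.toNat = 48 from rfl, show ('9').val.toNat = 57 from rfl,
      show ('A').val.toNat = 65 from rfl, show ('Z').val.toNat = 90 from rfl,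
      show ('a').val.toNat = 97 from rfl, show ('z').val.toNat = 122 from rfl]
  omega

theorem alnum_ne_lt_sp (c : Char) (h : aIsAlnum c = true) : c ≠ '<' ∧ c ≠ ' ' := by
  constructor <;> rintro rfl <;> simp [aIsAlnum] at h

theorem aSkipSpaces_cons_of_ne (c : Char) (rest : List Char) (h : c ≠ ' ') :
    aSkipSpaces (c :: rest) = c :: rest := by simp [aSkipSpaces, h]

theorem aTakeWord_eq (cs : List Char) :
    aTakeWord cs = (cs.takeWhile aIsAlnum, cs.dropWhile aIsAlnum) := by
  induction cs with
  | nil => simp [aTakeWord]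
  | cons c rest ih =>
    by_cases h : aIsAlnum c = true
    · simp [aTakeWord, h, ih]
    · simp [aTakeWord, h]

theorem dropWhile_head_false {p : Char → Bool} : ∀ (l : List Char) (d : Char) (ds : List Char),
    l.dropWhile p = d :: ds → p d = false := by
  intro l; induction l with
  | nil => intro d ds h; simp at h
  | cons c rest ih =>
    intro d ds h
    by_cases hc : p c = true
    · rw [List.dropWhile_cons_of_pos hc] at h; exact ih d ds h
    · rw [List.dropWhile_cons_of_neg (by simp_all)] at h
      cases h; simp_all

theorem tag_rel : ∀ rest : List Char,
    (aSkipTag rest = [] ∧ bDropTag rest = []) ∨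
    ∃ r', aSkipTag rest = '>' :: r' ∧ bDropTag rest = r' := by
  intro rest; induction rest with
  | nil => left; simp [aSkipTag, bDropTag]
  | cons c rest ih =>
    by_cases h : c = '>'
    · right; subst h; exact ⟨rest, by simp [aSkipTag, bDropTag]⟩
    · simpa [aSkipTag, bDropTag, h] using ih

-- the token/accumulator update of one else-branch iteration of A's outer loop
def aAcc (c : Char) (rest : List Char) (acc : List String) : List String :=
  if (aTakeWord (aSkipSpaces (c :: rest))).1.length > 0
  then acc ++ [String.mk (PySem.Chars.lower (aTakeWord (aSkipSpaces (c :: rest))).1)] else acc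

theorem aLoop_cons (c : Char) (rest : List Char) (acc : List String) (hc : ¬ c = '<') :
    aLoop (c :: rest) acc =
      match (aTakeWord (aSkipSpaces (c :: rest))).2 with
      | [] => aAcc c rest acc
      | d :: ds => if d = '<' then aLoop (d :: ds) (aAcc c rest acc)
                   else aLoop ds (aAcc c rest acc) := by
  rw [aLoop, dif_neg hc]
  simp only [aAcc]
  split
  · rename_i heq; rw [heq]
  · rename_i d ds heq; rw [heq]; simp only [dite_eq_ite]

theorem aLoop_lt (rest : List Char) (acc : List String) :
    aLoop ('<' :: rest) acc = aLoop (aSkipTag rest) acc := by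
  rw [aLoop]; simp

theorem aLoop_nonword (c : Char) (rest : List Char) (acc : List String)
    (h1 : c ≠ '<') (h2 : c ≠ ' ') (h3 : aIsAlnum c = false) :
    aLoop (c :: rest) acc = aLoop rest acc := by
  have ht : aTakeWord (c :: rest) = ([], c :: rest) := by simp [aTakeWord, h3]
  rw [aLoop_cons c rest acc h1]
  simp [aAcc, aSkipSpaces_cons_of_ne c rest h2, ht, h1]

theorem aLoop_space (rest : List Char) (acc : List String) :
    aLoop (' ' :: rest) acc = aLoop rest acc := by
  cases rest with
  | nil =>
    rw [aLoop_cons ' ' [] acc (by decide)]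
    simp [aAcc, aSkipSpaces, aTakeWord, aLoop]
  | cons c2 r2 =>
    by_cases h2 : c2 = '<'
    · subst h2
      have hs : aSkipSpaces (' ' :: '<' :: r2) = '<' :: r2 := by simp [aSkipSpaces]
      have ht : aTakeWord ('<' :: r2) = ([], '<' :: r2) := by
        simp [aTakeWord, show aIsAlnum '<' = false by decide]
      rw [aLoop_cons ' ' _ acc (by decide), aLoop_lt]
      simp [aAcc, hs, ht, aLoop_lt]
    · have hs : aSkipSpaces (' ' :: c2 :: r2) = aSkipSpaces (c2 :: r2) := by simp [aSkipSpaces]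
      rw [aLoop_cons ' ' _ acc (by decide), aLoop_cons c2 _ acc h2]
      simp only [aAcc, hs]

theorem bStrip_cons_of_ne (c : Char) (rest : List Char) (h : c ≠ '<') :
    bStrip (c :: rest) = c :: bStrip rest := by rw [bStrip]; simp [h]

theorem bWords_cons_of_neg (c : Char) (x : List Char) (h : bIsAlnum c = false) :
    bWords (c :: x) = bWords x := by rw [bWords]; simp [h]

theorem g_skip (c : Char) (rest : List Char) (h1 : c ≠ '<') (h2 : bIsAlnum c = false) :
    bWords (bStrip (c :: rest)) = bWords (bStrip rest) := by
  rw [bStrip_cons_of_ne c rest h1, bWords_cons_of_neg c _ h2]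

theorem bStrip_append_alnum : ∀ (t r : List Char), (∀ x ∈ t, aIsAlnum x = true) →
    bStrip (t ++ r) = t ++ bStrip r := by
  intro t; induction t with
  | nil => simp
  | cons c t ih =>
    intro r h
    have hc : c ≠ '<' := (alnum_ne_lt_sp c (h c (by simp))).1
    rw [List.cons_append, bStrip_cons_of_ne c _ hc, ih r (fun x hx => h x (by simp [hx]))]
    simp

theorem bStrip_head_not_alnum (r : List Char) (hr : ∀ d ds, r = d :: ds → aIsAlnum d = false) :
    (bStrip r).takeWhile bIsAlnum = [] ∧ (bStrip r).dropWhile bIsAlnum = bStrip r := by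
  cases r with
  | nil => simp [bStrip]
  | cons d ds =>
    have hd := hr d ds rfl
    by_cases h : d = '<'
    · subst h
      rw [bStrip]
      simp [show bIsAlnum ' ' = false by decide]
    · rw [bStrip_cons_of_ne d ds h, isAlnum_eq]
      simp [hd]

theorem main_lemma : ∀ n (cs : List Char), cs.length ≤ n → ∀ (acc : List String),
    aLoop cs acc = acc ++ (bWords (bStrip cs)).map (fun w => String.mk (PySem.Chars.lower w)) := by
  intro n
  induction n with
  | zero =>
    intro cs h acc
    have : cs = [] := by cases cs <;> simp_all
    subst this; simp [aLoop, bStrip, bWords]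
  | succ n ih =>
    intro cs hlen acc
    cases cs with
    | nil => simp [aLoop, bStrip, bWords]
    | cons c rest =>
      have hrest : rest.length ≤ n := by simp at hlen; omega
      by_cases hc : c = '<'
      · -- tag branch
        subst hc
        rw [aLoop_lt]
        rcases tag_rel rest with ⟨ha, hb⟩ | ⟨r', ha, hb⟩
        · rw [ha, bStrip, hb]
          simp [aLoop, bWords, show bIsAlnum ' ' = false by decide, bStrip]
        · have hr'len : r'.length ≤ n := by
            have := aSkipTag_length_le rest
            rw [ha] at this; simp at this; omega
          rw [ha, aLoop_nonword '>' r' acc (by decide) (by decide) (by decide)]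
          rw [ih r' hr'len acc, bStrip, hb]
          simp [bWords_cons_of_neg ' ' _ (by decide)]
      · by_cases ha : aIsAlnum c = true
        · -- word branch
          obtain ⟨hlt, hsp⟩ := alnum_ne_lt_sp c ha
          have hba : bIsAlnum c = true := by rw [isAlnum_eq]; exact ha
          have htwal : ∀ x ∈ rest.takeWhile aIsAlnum, aIsAlnum x = true :=
            fun x hx => List.mem_takeWhile_imp hx
          have hrhead : ∀ d ds, rest.dropWhile aIsAlnum = d :: ds → aIsAlnum d = false :=
            fun d ds h => dropWhile_head_false rest d ds h
          have htk : aTakeWord (c :: rest)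
              = (c :: rest.takeWhile aIsAlnum, rest.dropWhile aIsAlnum) := by
            rw [aTakeWord_eq]; simp [ha]
          have hAcc : aAcc c rest acc
              = acc ++ [String.mk (PySem.Chars.lower (c :: rest.takeWhile aIsAlnum))] := by
            simp [aAcc, aSkipSpaces_cons_of_ne c rest hsp, htk]
          obtain ⟨hth, hdh⟩ := bStrip_head_not_alnum (rest.dropWhile aIsAlnum) hrhead
          have hbs : bStrip (c :: rest)
              = c :: (rest.takeWhile aIsAlnum ++ bStrip (rest.dropWhile aIsAlnum)) := by
            rw [bStrip_cons_of_ne c rest hlt]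
            conv_lhs => rw [show rest = rest.takeWhile aIsAlnum ++ rest.dropWhile aIsAlnum
                              from (List.takeWhile_append_dropWhile).symm]
            rw [bStrip_append_alnum _ _ htwal]
          have hbw : bWords (bStrip (c :: rest))
              = (c :: rest.takeWhile aIsAlnum) :: bWords (bStrip (rest.dropWhile aIsAlnum)) := by
            rw [hbs, bWords]
            simp only [hba, dif_pos]
            have h1 : (rest.takeWhile aIsAlnum ++ bStrip (rest.dropWhile aIsAlnum)).takeWhile bIsAlnum
                = rest.takeWhile aIsAlnum := by
              rw [List.takeWhile_append]
              have : (rest.takeWhile aIsAlnum).takeWhile bIsAlnum = rest.takeWhile aIsAlnum := by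
                rw [List.takeWhile_eq_self_iff]; intro x hx; rw [isAlnum_eq]; exact htwal x hx
              simp [this, hth]
            have h2 : (rest.takeWhile aIsAlnum ++ bStrip (rest.dropWhile aIsAlnum)).dropWhile bIsAlnum
                = bStrip (rest.dropWhile aIsAlnum) := by
              rw [List.dropWhile_append]
              have : (rest.takeWhile aIsAlnum).dropWhile bIsAlnum = [] := by
                rw [List.dropWhile_eq_nil_iff]; intro x hx; rw [isAlnum_eq]; simp [htwal x hx]
              simp [this, hdh]
            rw [h1, h2]
          have hrlen : (rest.dropWhile aIsAlnum).length ≤ n :=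
            le_trans (List.length_dropWhile_le _ _) hrest
          rw [aLoop_cons c rest acc hc, aSkipSpaces_cons_of_ne c rest hsp, htk, hbw, hAcc]
          rcases hr : rest.dropWhile aIsAlnum with _ | ⟨d, ds⟩
          · simp [bStrip, bWords]
          · have hd := hrhead d ds hr
            rw [hr] at hrlen
            by_cases hdlt : d = '<'
            · subst hdlt
              simp only [if_pos rfl]
              rw [ih ('<' :: ds) hrlen _]
              simp
            · simp only [if_neg hdlt]
              have hds : ds.length ≤ n := by simp at hrlen; omega
              rw [ih ds hds _]
              have hskip : bWords (bStrip (d :: ds)) = bWords (bStrip ds) :=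
                g_skip d ds hdlt (by rw [isAlnum_eq]; exact hd)
              simp [hskip]
        · simp only [Bool.not_eq_true] at ha
          by_cases hsp : c = ' '
          · subst hsp
            rw [aLoop_space, ih rest hrest acc, g_skip ' ' rest (by decide) (by decide)]
          · rw [aLoop_nonword c rest acc hc hsp ha, ih rest hrest acc,
                g_skip c rest hc (by rw [isAlnum_eq]; exact ha)]

-- ===== VERDICT (by name: the statement is the Claim_ definition above) =====
theorem parse_spec : Claim_equal_parse := by
  intro text _
  unfold Spec_parse parse parse_alt
  exact main_lemma text.toList.length text.toList le_rfl []
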